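-- pv_equiv track=rewrite | github.com/arm/mcp | mcp-local/utils/migrate_ease_utils.py | _should_exclude
-- ===== SOURCE A (Python) =====
-- from typing import Dict, Any, List, Optional, Set
--
-- EXCLUDE_PATTERNS: Set[str] = {
--     # Python virtual environments
--     'venv', '.venv', 'env', 'ENV', 'virtualenv',
--     # Node.js dependencies
--     'node_modules',
--     # Python cache and build artifacts
--     '__pycache__', '.pytest_cache', '.mypy_cache', '.tox',
--     'build', 'dist', '*.egg-info',
--     # Version control
--     '.git', '.svn', '.hg',
--     # IDE and editor directories
--     '.vscode', '.idea', '.eclipse',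
--     # Other common build/cache directories
--     'target', 'out', '.cache',
-- }
--
-- def _should_exclude(name: str) -> bool:
--     """
--     Check if a file or directory should be excluded from the filtered workspace.
--
--     Args:
--         name: The file or directory name
--
--     Returns:
--         True if the item should be excluded, False otherwise
--     """
--     # Check exact matches
--     if name in EXCLUDE_PATTERNS:
--         return True
--
--     # Check pattern matches (e.g., *.egg-info)
--     for pattern in EXCLUDE_PATTERNS:
--         if '*' in pattern:
--             # Simple wildcard matching
--             if pattern.startswith('*') and name.endswith(pattern[1:]):
--                 return True
--             if pattern.endswith('*') and name.startswith(pattern[:-1]):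
--                 return True
--
--     return False
-- ===== SOURCE B (Python) =====
-- from typing import Dict, Any, List, Optional, Set
--
-- EXCLUDE_PATTERNS: Set[str] = {
--     'venv', '.venv', 'env', 'ENV', 'virtualenv',
--     'node_modules',
--     '__pycache__', '.pytest_cache', '.mypy_cache', '.tox',
--     'build', 'dist', '*.egg-info',
--     '.git', '.svn', '.hg',
--     '.vscode', '.idea', '.eclipse',
--     'target', 'out', '.cache',
-- }
--
-- def _match(name: str, pattern: str) -> bool:
--     """Case-sensitive glob match supporting '*' (the only metacharacter used)."""
--     if not pattern:
--         return not name
--     if pattern[0] == '*':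
--         # walk the suffixes of name iteratively; recursion depth stays bounded by the pattern
--         s = name
--         while True:
--             if _match(s, pattern[1:]):
--                 return True
--             if not s:
--                 return False
--             s = s[1:]
--     return bool(name) and name[0] == pattern[0] and _match(name[1:], pattern[1:])
--
-- def _should_exclude(name: str) -> bool:
--     # One uniform pass: every pattern (exact or wildcard) goes through the same matcher.
--     return any(_match(name, p) for p in EXCLUDE_PATTERNS)
-- ===== Notes on version B (the rewrite author's own statement) =====
-- stated objective: alternative
-- what changed: A's two-phase check (exact set membership, then a hand-rolled prefix/suffix wildcard loop over the patterns) is replaced by one uniform pass that runs every pattern, exact or wildcard, through a single recursive glob matcher.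
import Mathlib
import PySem

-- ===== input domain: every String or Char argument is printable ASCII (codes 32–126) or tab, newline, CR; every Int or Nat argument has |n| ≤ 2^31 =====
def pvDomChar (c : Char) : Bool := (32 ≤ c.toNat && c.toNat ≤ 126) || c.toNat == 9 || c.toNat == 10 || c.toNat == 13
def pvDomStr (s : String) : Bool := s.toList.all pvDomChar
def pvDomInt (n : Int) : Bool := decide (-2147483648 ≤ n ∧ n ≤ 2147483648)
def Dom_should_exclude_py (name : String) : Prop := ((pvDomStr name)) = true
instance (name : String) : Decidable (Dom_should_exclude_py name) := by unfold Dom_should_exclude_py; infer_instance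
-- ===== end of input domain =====

-- B replaces A's two-phase exact-set + hand-rolled wildcard check with one uniform pass
-- through a single recursive glob matcher (objective: alternative decomposition, not faster).

def pvExcludeList : List String :=
  ["venv", ".venv", "env", "ENV", "virtualenv",
   "node_modules",
   "__pycache__", ".pytest_cache", ".mypy_cache", ".tox",
   "build", "dist", "*.egg-info",
   ".git", ".svn", ".hg",
   ".vscode", ".idea", ".eclipse",
   "target", "out", ".cache"]

def EXCLUDE_PATTERNS : PySem.Set String := PySem.Set.ofList pvExcludeList

-- ===== PORT A =====
-- the 'for pattern in EXCLUDE_PATTERNS' loop with early return (order-independent: a pure any)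
def pvLoopA : List String → String → Bool
  | [], _ => false
  | p :: rest, name =>
    if PySem.Str.isIn "*" p then
      if PySem.Str.startswith p "*" && PySem.Str.endswith name (PySem.Str.slice p (some 1) none) then true
      else if PySem.Str.endswith p "*" && PySem.Str.startswith name (PySem.Str.slice p none (some (-1))) then true
      else pvLoopA rest name
    else pvLoopA rest name

def should_exclude_py (name : String) : Bool :=
  if PySem.Set.contains EXCLUDE_PATTERNS name then true
  else pvLoopA EXCLUDE_PATTERNS name

-- ===== PORT B =====
-- Source B's _match: case-sensitive glob supporting '*'
def pvMatch : List Char → List Char → Bool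
  | name, [] => name.isEmpty
  | name, p :: ps =>
    if p == '*' then
      pvMatch name ps ||
        (match name with
         | [] => false
         | _ :: t => pvMatch t (p :: ps))
    else
      match name with
      | [] => false
      | c :: t => c == p && pvMatch t ps
termination_by name pat => (pat.length, name.length)

def should_exclude_py_alt (name : String) : Bool :=
  EXCLUDE_PATTERNS.any (fun p => pvMatch name.toList p.toList)

-- ===== PRECONDITION & SPEC =====
def Spec_should_exclude_py (name : String) (out : Bool) : Prop := out = should_exclude_py_alt name
instance (name : String) (out : Bool) : Decidable (Spec_should_exclude_py name out) := by unfold Spec_should_exclude_py; infer_instance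

-- ===== CLAIM (what is proved, stated in full; the proofs are below) =====
def Claim_equal_should_exclude_py : Prop := ∀ (name : String), Dom_should_exclude_py name → Spec_should_exclude_py name (should_exclude_py name)

-- ===== LEMMAS AND PROOFS =====

-- a literal (star-free) pattern matches exactly itself
theorem pvMatch_lit (pat : List Char) (h : '*' ∉ pat) (name : List Char) :
    pvMatch name pat = decide (name = pat) := by
  induction pat generalizing name with
  | nil => cases name <;> simp [pvMatch]
  | cons p ps ih =>
    have hp : p ≠ '*' := by intro e; exact h (e ▸ List.mem_cons_self)
    have hps : '*' ∉ ps := fun m => h (List.mem_cons_of_mem _ m)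
    cases name with
    | nil => simp [pvMatch, hp]
    | cons c t =>
      simp [pvMatch, hp, ih hps]
      by_cases hc : c = p <;> simp [hc]

-- '*' followed by a star-free pattern matches exactly the suffixes
theorem pvMatch_star (pat : List Char) (h : '*' ∉ pat) (name : List Char) :
    pvMatch name ('*' :: pat) = decide (pat <:+ name) := by
  induction name with
  | nil =>
    simp [pvMatch, pvMatch_lit pat h, List.suffix_nil, eq_comm]
  | cons c t ih =>
    simp [pvMatch, pvMatch_lit pat h, ih, List.suffix_cons_iff, eq_comm]

theorem pvLoopA_no_star (p : String) (rest : List String) (name : String)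
    (h : PySem.Chars.isIn ['*'] p.toList = false) : pvLoopA (p :: rest) name = pvLoopA rest name := by
  simp [pvLoopA, h]

theorem pvLoopA_egg (rest : List String) (name : String) :
    pvLoopA ("*.egg-info" :: rest) name =
      (PySem.Chars.endswith name.toList ['.', 'e', 'g', 'g', '-', 'i', 'n', 'f', 'o'] || pvLoopA rest name) := by
  have h1 : PySem.Chars.isIn ['*'] ['*', '.', 'e', 'g', 'g', '-', 'i', 'n', 'f', 'o'] = true := by decide
  have h2 : PySem.Chars.startswith ['*', '.', 'e', 'g', 'g', '-', 'i', 'n', 'f', 'o'] ['*'] = true := by decide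
  have h3 : PySem.List.slice ['*', '.', 'e', 'g', 'g', '-', 'i', 'n', 'f', 'o'] (some 1) none = ['.', 'e', 'g', 'g', '-', 'i', 'n', 'f', 'o'] := by decide
  have h4 : PySem.Chars.endswith ['*', '.', 'e', 'g', 'g', '-', 'i', 'n', 'f', 'o'] ['*'] = false := by decide
  simp [pvLoopA, h1, h2, h3, h4]

theorem pvLoopA_eq (name : String) :
    pvLoopA pvExcludeList name = PySem.Str.endswith name ".egg-info" := by
  rw [pvExcludeList]
  rw [pvLoopA_no_star _ _ _ (by decide), pvLoopA_no_star _ _ _ (by decide),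
      pvLoopA_no_star _ _ _ (by decide), pvLoopA_no_star _ _ _ (by decide),
      pvLoopA_no_star _ _ _ (by decide), pvLoopA_no_star _ _ _ (by decide),
      pvLoopA_no_star _ _ _ (by decide), pvLoopA_no_star _ _ _ (by decide),
      pvLoopA_no_star _ _ _ (by decide), pvLoopA_no_star _ _ _ (by decide),
      pvLoopA_no_star _ _ _ (by decide), pvLoopA_no_star _ _ _ (by decide)]
  have hrest : pvLoopA [".git", ".svn", ".hg", ".vscode", ".idea", ".eclipse", "target", "out", ".cache"] name = false := by
    rw [pvLoopA_no_star _ _ _ (by decide), pvLoopA_no_star _ _ _ (by decide),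
        pvLoopA_no_star _ _ _ (by decide), pvLoopA_no_star _ _ _ (by decide),
        pvLoopA_no_star _ _ _ (by decide), pvLoopA_no_star _ _ _ (by decide),
        pvLoopA_no_star _ _ _ (by decide), pvLoopA_no_star _ _ _ (by decide),
        pvLoopA_no_star _ _ _ (by decide)]
    rfl
  rw [pvLoopA_egg, hrest]
  have hlit : ".egg-info".toList = ['.', 'e', 'g', 'g', '-', 'i', 'n', 'f', 'o'] := by decide
  simp [hlit]

-- ===== VERDICT (by name: the statement is the Claim_ definition above) =====
theorem should_exclude_py_spec : Claim_equal_should_exclude_py := by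
  intro name _
  unfold Spec_should_exclude_py
  have hE : EXCLUDE_PATTERNS = pvExcludeList := by decide
  rw [should_exclude_py, should_exclude_py_alt, hE, pvLoopA_eq]
  have hstar : "*.egg-info".toList = '*' :: ".egg-info".toList := by decide
  have hnostar : ('*' : Char) ∉ ".egg-info".toList := by decide
  simp only [pvExcludeList, List.any_cons, List.any_nil, hstar,
    pvMatch_star _ hnostar,
    pvMatch_lit _ (show ('*' : Char) ∉ "venv".toList by decide),
    pvMatch_lit _ (show ('*' : Char) ∉ ".venv".toList by decide),
    pvMatch_lit _ (show ('*' : Char) ∉ "env".toList by decide),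
    pvMatch_lit _ (show ('*' : Char) ∉ "ENV".toList by decide),
    pvMatch_lit _ (show ('*' : Char) ∉ "virtualenv".toList by decide),
    pvMatch_lit _ (show ('*' : Char) ∉ "node_modules".toList by decide),
    pvMatch_lit _ (show ('*' : Char) ∉ "__pycache__".toList by decide),
    pvMatch_lit _ (show ('*' : Char) ∉ ".pytest_cache".toList by decide),
    pvMatch_lit _ (show ('*' : Char) ∉ ".mypy_cache".toList by decide),
    pvMatch_lit _ (show ('*' : Char) ∉ ".tox".toList by decide),
    pvMatch_lit _ (show ('*' : Char) ∉ "build".toList by decide),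
    pvMatch_lit _ (show ('*' : Char) ∉ "dist".toList by decide),
    pvMatch_lit _ (show ('*' : Char) ∉ ".git".toList by decide),
    pvMatch_lit _ (show ('*' : Char) ∉ ".svn".toList by decide),
    pvMatch_lit _ (show ('*' : Char) ∉ ".hg".toList by decide),
    pvMatch_lit _ (show ('*' : Char) ∉ ".vscode".toList by decide),
    pvMatch_lit _ (show ('*' : Char) ∉ ".idea".toList by decide),
    pvMatch_lit _ (show ('*' : Char) ∉ ".eclipse".toList by decide),
    pvMatch_lit _ (show ('*' : Char) ∉ "target".toList by decide),
    pvMatch_lit _ (show ('*' : Char) ∉ "out".toList by decide),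
    pvMatch_lit _ (show ('*' : Char) ∉ ".cache".toList by decide)]
  simp only [String.toList_inj, PySem.Set.contains, List.contains_eq_mem]
  have hlit : ".egg-info".toList = ['.', 'e', 'g', 'g', '-', 'i', 'n', 'f', 'o'] := by decide
  by_cases hsuf : ".egg-info".toList <:+ name.toList
  · simp [PySem.Chars.endswith_iff, hlit ▸ hsuf]
  · have hne : name ≠ "*.egg-info" := by rintro rfl; exact hsuf (by decide)
    simp [PySem.Chars.endswith_iff, hlit ▸ hsuf, List.mem_cons, hne]
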